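-- pv_equiv track=rewrite | github.com/ivantronics/codewars_solutions | done.py | mix1
-- ===== SOURCE A (Python) =====
-- def mix1(s1, s2):
--     dct1 = {}
--     dct2 = {}
--     res = []
--     for letter in s1:
--         if letter.islower():
--             dct1[letter] = dct1.get(letter, 0) + 1
--     for letter in s2:
--         if letter.islower():
--             dct2[letter] = dct2.get(letter, 0) + 1
--     commons = set(dct1) & set(dct2)
--     uncomd2 = {i: dct2[i] for i in set(dct2) - set(dct1)}
--     uncomd1 = {i: dct1[i] for i in set(dct1) - set(dct2)}
--     for key in commons:
--         if dct1[key] > 1 or dct2[key] > 1: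
--             if dct1[key] == dct2[key]:
--                 res.append(f'=:{key * dct1.get(key)}')
--             else:
--                 mval = lambda: 1 if dct1[key] > dct2[key] else 2
--                 res.append(f'{mval()}:{key * max(dct1[key], dct2[key])}')
--     if uncomd1:
--         for key, value in uncomd1.items():
--             if uncomd1[key] > 1:
--                 res.append(f'1:{key * value}')
--     if uncomd2:
--         for key, value in uncomd2.items():
--             if uncomd2[key] > 1:
--                 res.append(f'2:{key * value}')
--     res.sort()
--     res.sort(key=lambda k: len(k) * -1)
--     return "/".join(res)
-- ===== SOURCE B (Python) =====
-- def mix1(s1, s2):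
--     def runs(s):
--         letters = sorted(c for c in s if c.islower())
--         out = []
--         i = 0
--         while i < len(letters):
--             j = i
--             while j < len(letters) and letters[j] == letters[i]:
--                 j += 1
--             out.append((letters[i], j - i))
--             i = j
--         return out
--
--     r1, r2 = runs(s1), runs(s2)
--     res = []
--     i = j = 0
--     while i < len(r1) or j < len(r2):
--         if j >= len(r2) or (i < len(r1) and r1[i][0] < r2[j][0]):
--             ch, c1, c2 = r1[i][0], r1[i][1], 0
--             i += 1
--         elif i >= len(r1) or r2[j][0] < r1[i][0]:
--             ch, c1, c2 = r2[j][0], 0, r2[j][1]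
--             j += 1
--         else:
--             ch, c1, c2 = r1[i][0], r1[i][1], r2[j][1]
--             i += 1
--             j += 1
--         m = max(c1, c2)
--         if m > 1:
--             label = '=' if c1 == c2 else ('1' if c1 > c2 else '2')
--             res.append(f'{label}:{ch * m}')
--     res.sort()
--     res.sort(key=lambda k: -len(k))
--     return '/'.join(res)
-- ===== Notes on version B (the rewrite author's own statement) =====
-- stated objective: alternative
-- what changed: B replaces A's two frequency dicts and three set-partition loops (commons/uncomd1/uncomd2) with a sorting-based algorithm: sort each string's lowercase letters, run-length-encode them into sorted (letter,count) lists, and produce the entries by a two-pointer merge of the two run lists.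
import Mathlib
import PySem

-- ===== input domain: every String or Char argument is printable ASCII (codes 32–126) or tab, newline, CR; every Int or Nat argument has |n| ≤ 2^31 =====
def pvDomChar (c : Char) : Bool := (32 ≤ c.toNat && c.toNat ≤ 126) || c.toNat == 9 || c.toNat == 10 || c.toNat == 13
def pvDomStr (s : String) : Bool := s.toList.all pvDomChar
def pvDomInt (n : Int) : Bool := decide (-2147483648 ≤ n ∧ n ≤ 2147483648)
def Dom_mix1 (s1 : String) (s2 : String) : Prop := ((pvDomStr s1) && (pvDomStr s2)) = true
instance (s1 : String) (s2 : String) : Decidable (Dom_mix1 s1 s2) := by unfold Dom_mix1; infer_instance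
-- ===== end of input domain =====

-- B replaces A's frequency dicts and set-partitions by a sorting-based algorithm:
-- sort each string's lowercase letters, run-length-encode them, and two-pointer-merge
-- the two sorted run lists (objective: alternative; both return the same string).

-- ===== PORT A =====
-- Iteration over Python sets (commons, set differences) is ported in first-insertion order;
-- the final two sorts make the result independent of that iteration order.
-- dct1[key] / dct2[key] / dct1.get(key) / uncomd1[key] are ported as Dict.getD _ _ 0: the keys
-- iterated are always present, so no KeyError is reachable and getD is exact there.
-- f'{label}:{key * n}' is built by hand as label :: ':' :: List.replicate n.toNat key (exact:
-- n is a positive count and key * n is string repetition).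
def mix1 (s1 : String) (s2 : String) : String :=
  let dct1 := s1.toList.foldl
    (fun d c => if PySem.Str.islower c = true then d.modify c 0 (fun x => x + 1) else d)
    (PySem.Dict.empty : PySem.Dict Char Int)
  let dct2 := s2.toList.foldl
    (fun d c => if PySem.Str.islower c = true then d.modify c 0 (fun x => x + 1) else d)
    (PySem.Dict.empty : PySem.Dict Char Int)
  let commons := PySem.Set.inter (PySem.Set.ofList dct1.keys) (PySem.Set.ofList dct2.keys)
  let uncomd2 := (PySem.Set.diff (PySem.Set.ofList dct2.keys) (PySem.Set.ofList dct1.keys)).foldl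
    (fun d i => d.insert i (dct2.getD i 0)) PySem.Dict.empty
  let uncomd1 := (PySem.Set.diff (PySem.Set.ofList dct1.keys) (PySem.Set.ofList dct2.keys)).foldl
    (fun d i => d.insert i (dct1.getD i 0)) PySem.Dict.empty
  let res : List (List Char) := commons.foldl
    (fun acc key =>
      if 1 < dct1.getD key 0 ∨ 1 < dct2.getD key 0 then
        if dct1.getD key 0 = dct2.getD key 0 then
          acc ++ ['=' :: ':' :: List.replicate (dct1.getD key 0).toNat key]
        else
          acc ++ [(if dct2.getD key 0 < dct1.getD key 0 then '1' else '2') :: ':' ::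
                  List.replicate (max (dct1.getD key 0) (dct2.getD key 0)).toNat key]
      else acc) []
  let res := if uncomd1.items.isEmpty then res else
    uncomd1.items.foldl
      (fun acc kv =>
        if 1 < uncomd1.getD kv.1 0 then
          acc ++ ['1' :: ':' :: List.replicate kv.2.toNat kv.1]
        else acc) res
  let res := if uncomd2.items.isEmpty then res else
    uncomd2.items.foldl
      (fun acc kv =>
        if 1 < uncomd2.getD kv.1 0 then
          acc ++ ['2' :: ':' :: List.replicate kv.2.toNat kv.1]
        else acc) res
  let res := @PySem.List.sorted (List Char) (List Char) List.instLinearOrder.toLT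
    LinearOrder.toDecidableLT res (fun k => k) false
  let res := PySem.List.sorted res (fun k => -(k.length : Int)) false
  String.ofList (PySem.Chars.join ['/'] res)

-- ===== PORT B =====
-- runs(s): the sorted lowercase letters are grouped by the inner while loop scanning the
-- current run (j advances while letters[j] == letters[i]); ported as takeWhile/dropWhile.
def pvRuns : List Char → List (Char × Int)
  | [] => []
  | c :: rest =>
      (c, ((rest.takeWhile (fun x => x == c)).length : Int) + 1) ::
        pvRuns (rest.dropWhile (fun x => x == c))
  termination_by l => l.length
  decreasing_by
    exact Nat.lt_succ_of_le (List.length_dropWhile_le _ _)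

-- the loop body's conditional res.append (m > 1) as a zero/one-element list
def pvEntry (ch : Char) (c1 c2 : Int) : List (List Char) :=
  if 1 < max c1 c2 then
    [(if c1 = c2 then '=' else if c2 < c1 then '1' else '2') :: ':' ::
      List.replicate (max c1 c2).toNat ch]
  else []

-- the two-pointer while loop over r1, r2 (branch order as in Source B)
def pvMergeLoop : List (Char × Int) → List (Char × Int) → List (List Char)
  | [], [] => []
  | (c, n) :: t1, [] => pvEntry c n 0 ++ pvMergeLoop t1 []
  | [], (c, n) :: t2 => pvEntry c 0 n ++ pvMergeLoop [] t2
  | (a, n1) :: t1, (b, n2) :: t2 =>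
      if a < b then pvEntry a n1 0 ++ pvMergeLoop t1 ((b, n2) :: t2)
      else if b < a then pvEntry b 0 n2 ++ pvMergeLoop ((a, n1) :: t1) t2
      else pvEntry a n1 n2 ++ pvMergeLoop t1 t2
  termination_by r1 r2 => r1.length + r2.length

def mix1_alt (s1 : String) (s2 : String) : String :=
  let r1 := pvRuns (PySem.List.sorted (s1.toList.filter PySem.Str.islower) (fun c => c) false)
  let r2 := pvRuns (PySem.List.sorted (s2.toList.filter PySem.Str.islower) (fun c => c) false)
  let res := pvMergeLoop r1 r2
  let res := @PySem.List.sorted (List Char) (List Char) List.instLinearOrder.toLT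
    LinearOrder.toDecidableLT res (fun k => k) false
  let res := PySem.List.sorted res (fun k => -(k.length : Int)) false
  String.ofList (PySem.Chars.join ['/'] res)

-- ===== PRECONDITION & SPEC =====
def Spec_mix1 (s1 : String) (s2 : String) (out : String) : Prop := out = mix1_alt s1 s2
instance (s1 : String) (s2 : String) (out : String) : Decidable (Spec_mix1 s1 s2 out) := by unfold Spec_mix1; infer_instance

-- ===== CLAIM (what is proved, stated in full; the proofs are below) =====
def Claim_equal_mix1 : Prop := ∀ (s1 : String) (s2 : String), Dom_mix1 s1 s2 → Spec_mix1 s1 s2 (mix1 s1 s2)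

-- ===== LEMMAS AND PROOFS =====

-- the res list A builds, before the two sorts (copied from mix1 so mix1 unfolds to it by rfl)
def pvResA (s1 : String) (s2 : String) : List (List Char) :=
  let dct1 := s1.toList.foldl
    (fun d c => if PySem.Str.islower c = true then d.modify c 0 (fun x => x + 1) else d)
    (PySem.Dict.empty : PySem.Dict Char Int)
  let dct2 := s2.toList.foldl
    (fun d c => if PySem.Str.islower c = true then d.modify c 0 (fun x => x + 1) else d)
    (PySem.Dict.empty : PySem.Dict Char Int)
  let commons := PySem.Set.inter (PySem.Set.ofList dct1.keys) (PySem.Set.ofList dct2.keys)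
  let uncomd2 := (PySem.Set.diff (PySem.Set.ofList dct2.keys) (PySem.Set.ofList dct1.keys)).foldl
    (fun d i => d.insert i (dct2.getD i 0)) PySem.Dict.empty
  let uncomd1 := (PySem.Set.diff (PySem.Set.ofList dct1.keys) (PySem.Set.ofList dct2.keys)).foldl
    (fun d i => d.insert i (dct1.getD i 0)) PySem.Dict.empty
  let res : List (List Char) := commons.foldl
    (fun acc key =>
      if 1 < dct1.getD key 0 ∨ 1 < dct2.getD key 0 then
        if dct1.getD key 0 = dct2.getD key 0 then
          acc ++ ['=' :: ':' :: List.replicate (dct1.getD key 0).toNat key]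
        else
          acc ++ [(if dct2.getD key 0 < dct1.getD key 0 then '1' else '2') :: ':' ::
                  List.replicate (max (dct1.getD key 0) (dct2.getD key 0)).toNat key]
      else acc) []
  let res := if uncomd1.items.isEmpty then res else
    uncomd1.items.foldl
      (fun acc kv =>
        if 1 < uncomd1.getD kv.1 0 then
          acc ++ ['1' :: ':' :: List.replicate kv.2.toNat kv.1]
        else acc) res
  let res := if uncomd2.items.isEmpty then res else
    uncomd2.items.foldl
      (fun acc kv =>
        if 1 < uncomd2.getD kv.1 0 then
          acc ++ ['2' :: ':' :: List.replicate kv.2.toNat kv.1]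
        else acc) res
  res

-- the res list B builds, before the two sorts
def pvResB (s1 : String) (s2 : String) : List (List Char) :=
  pvMergeLoop
    (pvRuns (PySem.List.sorted (s1.toList.filter PySem.Str.islower) (fun c => c) false))
    (pvRuns (PySem.List.sorted (s2.toList.filter PySem.Str.islower) (fun c => c) false))

theorem pvMix1_eq (s1 s2 : String) :
    mix1 s1 s2 = String.ofList (PySem.Chars.join ['/']
      (PySem.List.sorted (@PySem.List.sorted (List Char) (List Char) List.instLinearOrder.toLT
          LinearOrder.toDecidableLT (pvResA s1 s2) (fun k => k) false)
        (fun k => -(k.length : Int)) false)) := rfl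

theorem pvMix1_alt_eq (s1 s2 : String) :
    mix1_alt s1 s2 = String.ofList (PySem.Chars.join ['/']
      (PySem.List.sorted (@PySem.List.sorted (List Char) (List Char) List.instLinearOrder.toLT
          LinearOrder.toDecidableLT (pvResB s1 s2) (fun k => k) false)
        (fun k => -(k.length : Int)) false)) := rfl

-- lowercase count of a character in a string
def pvCnt (l : List Char) (i : Char) : Int := ((l.filter PySem.Str.islower).count i : Int)

-- the per-letter entry for given counts, as an Option (pvEntry is its toList)
def pvGg (ch : Char) (c1 c2 : Int) : Option (List Char) :=
  if 1 < max c1 c2 then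
    some ((if c1 = c2 then '=' else if c2 < c1 then '1' else '2') :: ':' ::
      List.replicate (max c1 c2).toNat ch)
  else none

-- the common per-letter entry function both res lists are filterMaps of
def pvG (l1 l2 : List Char) (i : Char) : Option (List Char) :=
  if 1 < max (pvCnt l1 i) (pvCnt l2 i) then
    some ((if pvCnt l1 i = pvCnt l2 i then '=' else if pvCnt l2 i < pvCnt l1 i then '1' else '2')
          :: ':' :: List.replicate (max (pvCnt l1 i) (pvCnt l2 i)).toNat i)
  else none

theorem pvG_eq_pvGg (l1 l2 : List Char) (i : Char) :
    pvG l1 l2 i = pvGg i (pvCnt l1 i) (pvCnt l2 i) := rfl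

theorem pvEntry_eq_toList (ch : Char) (c1 c2 : Int) :
    pvEntry ch c1 c2 = (pvGg ch c1 c2).toList := by
  unfold pvEntry pvGg; split <;> rfl

theorem pvCnt_def (l : List Char) (i : Char) :
    pvCnt l i = ((List.count i (List.filter PySem.Str.islower l) : Nat) : Int) := rfl

theorem pvFilterMap_if {α β : Type} (p : α → Bool) (f : α → β) (l : List α) :
    l.filterMap (fun i => if p i then some (f i) else none) = (l.filter p).map f := by
  induction l with
  | nil => rfl
  | cons x xs ih => by_cases h : p x <;> simp [h, ih]

theorem pvCounter_eq (l : List Char) :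
    l.foldl (fun d c => if PySem.Str.islower c = true then d.modify c 0 (fun x => x + 1) else d)
      (PySem.Dict.empty : PySem.Dict Char Int)
    = PySem.Dict.counter (l.filter PySem.Str.islower) := by
  rw [PySem.List.foldl_if_eq_foldl_filter]; rfl

theorem pvFoldInsert_items (f : Char → Int) (ks : List Char) (hk : ks.Nodup) :
    (ks.foldl (fun d i => d.insert i (f i)) (PySem.Dict.empty : PySem.Dict Char Int)).items
    = ks.map (fun i => (i, f i)) := by
  suffices h : ∀ (d : PySem.Dict Char Int), ks.Nodup → (∀ i ∈ ks, d.contains i = false) →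
      (ks.foldl (fun d i => d.insert i (f i)) d).items = d.items ++ ks.map (fun i => (i, f i)) by
    simpa using h PySem.Dict.empty hk (by simp [PySem.Dict.contains_empty])
  clear hk
  induction ks with
  | nil => simp
  | cons x xs ih =>
    intro d hnd hcon
    simp only [List.foldl_cons, List.map_cons]
    rw [ih (d.insert x (f x)) hnd.of_cons]
    · rw [PySem.Dict.items_insert_of_not_contains d (f x) (hcon x (by simp))]
      simp
    · intro i hi
      rw [PySem.Dict.contains_insert]
      have : i ≠ x := by rintro rfl; exact (List.nodup_cons.mp hnd).1 hi
      simp [this, hcon i (List.mem_cons_of_mem _ hi)]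

theorem pvIfEmpty {α β : Type} (L : List α) (f : β → α → β) (r : β) :
    (if L.isEmpty then r else L.foldl f r) = L.foldl f r := by
  cases L <;> simp

theorem pvUncomdLoop (label : Char) (f : Char → Int) (ks : List Char) (hk : ks.Nodup)
    (res : List (List Char)) :
    (if (ks.foldl (fun d i => d.insert i (f i)) (PySem.Dict.empty : PySem.Dict Char Int)).items.isEmpty
     then res
     else (ks.foldl (fun d i => d.insert i (f i)) (PySem.Dict.empty : PySem.Dict Char Int)).items.foldl
       (fun acc kv =>
         if 1 < (ks.foldl (fun d i => d.insert i (f i)) (PySem.Dict.empty : PySem.Dict Char Int)).getD kv.1 0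
         then acc ++ [label :: ':' :: List.replicate kv.2.toNat kv.1] else acc) res)
    = res ++ (ks.filter (fun i => decide (1 < f i))).map
        (fun i => label :: ':' :: List.replicate (f i).toNat i) := by
  have hitems := pvFoldInsert_items f ks hk
  set u := ks.foldl (fun d i => d.insert i (f i)) (PySem.Dict.empty : PySem.Dict Char Int) with hu
  have hkeys : u.keys = ks := by
    show List.map (fun x => x.1) u.items = ks
    rw [hitems, List.map_map]; simp [Function.comp_def]
  have hgetD : ∀ kv ∈ u.items, u.getD kv.1 0 = kv.2 := by
    intro kv hkv
    have h2 : (kv.1, kv.2) ∈ u.items := by simpa using hkv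
    exact PySem.Dict.getD_of_mem_items u h2 (by rw [hkeys]; exact hk) 0
  rw [pvIfEmpty]
  have hcong := PySem.List.foldl_congr_mem
    (l := u.items) (init := res)
    (f := fun acc kv =>
      if 1 < u.getD kv.1 0 then acc ++ [label :: ':' :: List.replicate kv.2.toNat kv.1] else acc)
    (g := fun acc kv =>
      if 1 < kv.2 then acc ++ [label :: ':' :: List.replicate kv.2.toNat kv.1] else acc)
    (by intro acc kv hkv; beta_reduce; rw [hgetD kv hkv])
  rw [hcong]
  rw [PySem.List.foldl_append_ite (p := fun kv : Char × Int => 1 < kv.2)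
    (f := fun kv : Char × Int => label :: ':' :: List.replicate kv.2.toNat kv.1)]
  rw [hitems, List.filter_map, List.map_map]
  rfl

theorem pvCommonsLoop (c1 c2 : Char → Int) (ks : List Char) :
    ks.foldl (fun acc key =>
      if 1 < c1 key ∨ 1 < c2 key then
        if c1 key = c2 key then
          acc ++ ['=' :: ':' :: List.replicate (c1 key).toNat key]
        else
          acc ++ [(if c2 key < c1 key then '1' else '2') :: ':' ::
                  List.replicate (max (c1 key) (c2 key)).toNat key]
      else acc) []
    = (ks.filter (fun key => decide (1 < c1 key ∨ 1 < c2 key))).map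
        (fun key =>
          if c1 key = c2 key then '=' :: ':' :: List.replicate (c1 key).toNat key
          else (if c2 key < c1 key then '1' else '2') :: ':' ::
               List.replicate (max (c1 key) (c2 key)).toNat key) := by
  have hcong := PySem.List.foldl_congr_mem
    (l := ks) (init := ([] : List (List Char)))
    (f := fun acc key =>
      if 1 < c1 key ∨ 1 < c2 key then
        if c1 key = c2 key then
          acc ++ ['=' :: ':' :: List.replicate (c1 key).toNat key]
        else
          acc ++ [(if c2 key < c1 key then '1' else '2') :: ':' ::
                  List.replicate (max (c1 key) (c2 key)).toNat key]
      else acc)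
    (g := fun acc key =>
      if 1 < c1 key ∨ 1 < c2 key then
        acc ++ [if c1 key = c2 key then '=' :: ':' :: List.replicate (c1 key).toNat key
                else (if c2 key < c1 key then '1' else '2') :: ':' ::
                     List.replicate (max (c1 key) (c2 key)).toNat key]
      else acc)
    (by intro acc key _; beta_reduce; split_ifs <;> rfl)
  rw [hcong]
  rw [PySem.List.foldl_append_ite (p := fun key => 1 < c1 key ∨ 1 < c2 key)]
  rfl

theorem pvSegInter (l1 l2 : List Char) (ks : List Char) :
    (ks.filter (fun key => decide (1 < pvCnt l1 key ∨ 1 < pvCnt l2 key))).map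
        (fun key =>
          if pvCnt l1 key = pvCnt l2 key then '=' :: ':' :: List.replicate (pvCnt l1 key).toNat key
          else (if pvCnt l2 key < pvCnt l1 key then '1' else '2') :: ':' ::
               List.replicate (max (pvCnt l1 key) (pvCnt l2 key)).toNat key)
    = ks.filterMap (pvG l1 l2) := by
  rw [← pvFilterMap_if]
  apply List.filterMap_congr
  intro i _
  beta_reduce
  unfold pvG
  by_cases h : 1 < pvCnt l1 i ∨ 1 < pvCnt l2 i
  · by_cases h2 : pvCnt l1 i = pvCnt l2 i
    · simp [h2]
    · simp [h2, lt_max_iff.mpr h, h]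
  · simp [h]

theorem pvSegDiff1 (l1 l2 : List Char) (ks : List Char)
    (hks : ∀ i ∈ ks, i ∉ l2.filter PySem.Str.islower) :
    (ks.filter (fun i => decide (1 < pvCnt l1 i))).map
        (fun i => '1' :: ':' :: List.replicate (pvCnt l1 i).toNat i)
    = ks.filterMap (pvG l1 l2) := by
  rw [← pvFilterMap_if]
  apply List.filterMap_congr
  intro i hi
  beta_reduce
  have h0 : pvCnt l2 i = 0 := by
    unfold pvCnt; exact_mod_cast congrArg (Nat.cast : Nat → Int) (List.count_eq_zero.mpr (hks i hi))
  have hnn : (0 : Int) ≤ pvCnt l1 i := by unfold pvCnt; exact Int.natCast_nonneg _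
  unfold pvG
  rw [h0, max_eq_left hnn]
  by_cases hc : 1 < pvCnt l1 i
  · have hne : ¬ pvCnt l1 i = 0 := by intro h; rw [h] at hc; exact absurd hc (by norm_num)
    have hlt : (0 : Int) < pvCnt l1 i := lt_trans zero_lt_one hc
    simp [hc, hne, hlt]
  · simp [hc]

theorem pvSegDiff2 (l1 l2 : List Char) (ks : List Char)
    (hks : ∀ i ∈ ks, i ∉ l1.filter PySem.Str.islower) :
    (ks.filter (fun i => decide (1 < pvCnt l2 i))).map
        (fun i => '2' :: ':' :: List.replicate (pvCnt l2 i).toNat i)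
    = ks.filterMap (pvG l1 l2) := by
  rw [← pvFilterMap_if]
  apply List.filterMap_congr
  intro i hi
  beta_reduce
  have h0 : pvCnt l1 i = 0 := by
    unfold pvCnt; exact_mod_cast congrArg (Nat.cast : Nat → Int) (List.count_eq_zero.mpr (hks i hi))
  have hnn : (0 : Int) ≤ pvCnt l2 i := by unfold pvCnt; exact Int.natCast_nonneg _
  unfold pvG
  rw [h0, max_eq_right hnn]
  by_cases hc : 1 < pvCnt l2 i
  · have hne : ¬ (0 : Int) = pvCnt l2 i := by intro h; rw [← h] at hc; exact absurd hc (by norm_num)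
    have hnl : ¬ pvCnt l2 i < 0 := not_lt.mpr hnn
    simp [hc, hne, hnl]
  · simp [hc]

theorem pvResA_eq (s1 s2 : String) :
    pvResA s1 s2 =
      (PySem.Set.inter (PySem.Set.ofList (s1.toList.filter PySem.Str.islower))
          (PySem.Set.ofList (s2.toList.filter PySem.Str.islower)) ++
        PySem.Set.diff (PySem.Set.ofList (s1.toList.filter PySem.Str.islower))
          (PySem.Set.ofList (s2.toList.filter PySem.Str.islower)) ++
        PySem.Set.diff (PySem.Set.ofList (s2.toList.filter PySem.Str.islower))
          (PySem.Set.ofList (s1.toList.filter PySem.Str.islower))).filterMap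
        (pvG s1.toList s2.toList) := by
  unfold pvResA
  simp only [pvCounter_eq, PySem.Dict.keys_counter, PySem.Set.ofList_ofList,
    PySem.Dict.getD_counter]
  rw [pvCommonsLoop (fun key => ((s1.toList.filter PySem.Str.islower).count key : Int))
      (fun key => ((s2.toList.filter PySem.Str.islower).count key : Int))]
  rw [pvUncomdLoop '1' (fun i => ((s1.toList.filter PySem.Str.islower).count i : Int))
      (PySem.Set.diff (PySem.Set.ofList (s1.toList.filter PySem.Str.islower))
        (PySem.Set.ofList (s2.toList.filter PySem.Str.islower)))
      (PySem.Set.nodup_diff _ _ (PySem.Set.nodup_ofList _))]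
  rw [pvUncomdLoop '2' (fun i => ((s2.toList.filter PySem.Str.islower).count i : Int))
      (PySem.Set.diff (PySem.Set.ofList (s2.toList.filter PySem.Str.islower))
        (PySem.Set.ofList (s1.toList.filter PySem.Str.islower)))
      (PySem.Set.nodup_diff _ _ (PySem.Set.nodup_ofList _))]
  simp only [← pvCnt_def]
  rw [List.filterMap_append, List.filterMap_append]
  congr 1
  · congr 1
    · exact pvSegInter _ _ _
    · exact pvSegDiff1 s1.toList s2.toList _
        (by intro i hi
            exact ((PySem.Set.mem_diff _ _ i).mp hi).2 ∘ (PySem.Set.mem_ofList _ i).mpr)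
  · exact pvSegDiff2 s1.toList s2.toList _
        (by intro i hi
            exact ((PySem.Set.mem_diff _ _ i).mp hi).2 ∘ (PySem.Set.mem_ofList _ i).mpr)

-- ----- B side: runs, union, merge -----

-- sorted-merge of the two key lists (the order in which the two-pointer loop visits letters)
def pvUnion : List Char → List Char → List Char
  | [], [] => []
  | a :: t1, [] => a :: pvUnion t1 []
  | [], b :: t2 => b :: pvUnion [] t2
  | a :: t1, b :: t2 =>
      if a < b then a :: pvUnion t1 (b :: t2)
      else if b < a then b :: pvUnion (a :: t1) t2
      else a :: pvUnion t1 t2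
  termination_by k1 k2 => k1.length + k2.length

theorem pvMem_union (c : Char) : ∀ k1 k2 : List Char,
    (c ∈ pvUnion k1 k2 ↔ c ∈ k1 ∨ c ∈ k2) := by
  intro k1 k2
  fun_induction pvUnion k1 k2 with
  | case1 => simp
  | case2 a t1 ih => simp [ih]
  | case3 b t2 ih => simp [ih]
  | case4 a t1 b t2 h ih => simp [ih]; tauto
  | case5 a t1 b t2 h h' ih => simp [ih]; tauto
  | case6 a t1 b t2 h h' ih =>
      have : a = b := le_antisymm (not_lt.mp h') (not_lt.mp h)
      subst this
      simp [ih]; tauto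

theorem pvUnion_sorted : ∀ k1 k2 : List Char, k1.Pairwise (· < ·) → k2.Pairwise (· < ·) →
    (pvUnion k1 k2).Pairwise (· < ·) := by
  intro k1 k2
  fun_induction pvUnion k1 k2 with
  | case1 => intro _ _; simp
  | case2 a t1 ih =>
      intro h1 h2
      refine List.pairwise_cons.mpr ⟨?_, ih (List.pairwise_cons.mp h1).2 h2⟩
      intro y hy
      rcases (pvMem_union y t1 []).mp hy with h | h
      · exact (List.pairwise_cons.mp h1).1 y h
      · simp at h
  | case3 b t2 ih =>
      intro h1 h2
      refine List.pairwise_cons.mpr ⟨?_, ih h1 (List.pairwise_cons.mp h2).2⟩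
      intro y hy
      rcases (pvMem_union y [] t2).mp hy with h | h
      · simp at h
      · exact (List.pairwise_cons.mp h2).1 y h
  | case4 a t1 b t2 hab ih =>
      intro h1 h2
      refine List.pairwise_cons.mpr ⟨?_, ih (List.pairwise_cons.mp h1).2 h2⟩
      intro y hy
      rcases (pvMem_union y t1 (b :: t2)).mp hy with h | h
      · exact (List.pairwise_cons.mp h1).1 y h
      · rcases List.mem_cons.mp h with rfl | h
        · exact hab
        · exact lt_trans hab ((List.pairwise_cons.mp h2).1 y h)
  | case5 a t1 b t2 hab hba ih =>
      intro h1 h2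
      refine List.pairwise_cons.mpr ⟨?_, ih h1 (List.pairwise_cons.mp h2).2⟩
      intro y hy
      rcases (pvMem_union y (a :: t1) t2).mp hy with h | h
      · rcases List.mem_cons.mp h with rfl | h
        · exact hba
        · exact lt_trans hba ((List.pairwise_cons.mp h1).1 y h)
      · exact (List.pairwise_cons.mp h2).1 y h
  | case6 a t1 b t2 hab hba ih =>
      intro h1 h2
      have heq : a = b := le_antisymm (not_lt.mp hba) (not_lt.mp hab)
      subst heq
      refine List.pairwise_cons.mpr ⟨?_, ih (List.pairwise_cons.mp h1).2 (List.pairwise_cons.mp h2).2⟩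
      intro y hy
      rcases (pvMem_union y t1 t2).mp hy with h | h
      · exact (List.pairwise_cons.mp h1).1 y h
      · exact (List.pairwise_cons.mp h2).1 y h

-- the two-pointer merge over mapped key lists is the filterMap over the merged key order
theorem pvMerge_spec (g1 g2 : Char → Int) : ∀ k1 k2 : List Char,
    (∀ c ∈ k1, c ∉ k2 → g2 c = 0) → (∀ c ∈ k2, c ∉ k1 → g1 c = 0) →
    k1.Pairwise (· < ·) → k2.Pairwise (· < ·) →
    pvMergeLoop (k1.map (fun c => (c, g1 c))) (k2.map (fun c => (c, g2 c)))
      = (pvUnion k1 k2).filterMap (fun c => pvGg c (g1 c) (g2 c)) := by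
  intro k1 k2
  fun_induction pvUnion k1 k2 with
  | case1 => intro _ _ _ _; simp [pvMergeLoop]
  | case2 a t1 ih =>
      intro hg2 hg1 h1 h2
      simp only [List.map_cons, List.map_nil]
      rw [pvMergeLoop, List.filterMap_cons]
      have hz : g2 a = 0 := hg2 a (by simp) (by simp)
      have he : pvEntry a (g1 a) 0 = (pvGg a (g1 a) (g2 a)).toList := by
        rw [hz]; exact pvEntry_eq_toList a (g1 a) 0
      have ih' := ih (fun c hc hn => hg2 c (List.mem_cons_of_mem _ hc) hn)
        (by intro c hc; simp at hc) (List.pairwise_cons.mp h1).2 h2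
      simp only [List.map_nil] at ih'
      rw [he, ih']
      cases pvGg a (g1 a) (g2 a) <;> simp
  | case3 b t2 ih =>
      intro hg2 hg1 h1 h2
      simp only [List.map_cons, List.map_nil]
      rw [pvMergeLoop, List.filterMap_cons]
      have hz : g1 b = 0 := hg1 b (by simp) (by simp)
      have he : pvEntry b 0 (g2 b) = (pvGg b (g1 b) (g2 b)).toList := by
        rw [hz]; exact pvEntry_eq_toList b 0 (g2 b)
      have ih' := ih (by intro c hc; simp at hc)
        (fun c hc hn => hg1 c (List.mem_cons_of_mem _ hc) hn) h1 (List.pairwise_cons.mp h2).2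
      simp only [List.map_nil] at ih'
      rw [he, ih']
      cases pvGg b (g1 b) (g2 b) <;> simp
  | case4 a t1 b t2 hab ih =>
      intro hg2 hg1 h1 h2
      simp only [List.map_cons]
      rw [pvMergeLoop]
      simp only [if_pos hab]
      rw [List.filterMap_cons]
      have hanb : a ∉ b :: t2 := by
        intro h
        rcases List.mem_cons.mp h with rfl | h
        · exact lt_irrefl a hab
        · exact lt_irrefl a (lt_trans hab ((List.pairwise_cons.mp h2).1 a h))
      have hz : g2 a = 0 := hg2 a (by simp) hanb
      have he : pvEntry a (g1 a) 0 = (pvGg a (g1 a) (g2 a)).toList := by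
        rw [hz]; exact pvEntry_eq_toList a (g1 a) 0
      have hg1' : ∀ c ∈ b :: t2, c ∉ t1 → g1 c = 0 := by
        intro c hc hn
        have hca : a < c := by
          rcases List.mem_cons.mp hc with rfl | h
          · exact hab
          · exact lt_trans hab ((List.pairwise_cons.mp h2).1 c h)
        refine hg1 c hc ?_
        intro hm
        rcases List.mem_cons.mp hm with rfl | hm
        · exact lt_irrefl c hca
        · exact hn hm
      have ih' := ih (fun c hc hn => hg2 c (List.mem_cons_of_mem _ hc) hn) hg1'
        (List.pairwise_cons.mp h1).2 h2
      simp only [List.map_cons] at ih'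
      rw [he, ih']
      cases pvGg a (g1 a) (g2 a) <;> simp
  | case5 a t1 b t2 hab hba ih =>
      intro hg2 hg1 h1 h2
      simp only [List.map_cons]
      rw [pvMergeLoop]
      simp only [if_neg hab, if_pos hba]
      rw [List.filterMap_cons]
      have hbna : b ∉ a :: t1 := by
        intro h
        rcases List.mem_cons.mp h with rfl | h
        · exact lt_irrefl b hba
        · exact lt_irrefl b (lt_trans hba ((List.pairwise_cons.mp h1).1 b h))
      have hz : g1 b = 0 := hg1 b (by simp) hbna
      have he : pvEntry b 0 (g2 b) = (pvGg b (g1 b) (g2 b)).toList := by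
        rw [hz]; exact pvEntry_eq_toList b 0 (g2 b)
      have hg2' : ∀ c ∈ a :: t1, c ∉ t2 → g2 c = 0 := by
        intro c hc hn
        have hcb : b < c := by
          rcases List.mem_cons.mp hc with rfl | h
          · exact hba
          · exact lt_trans hba ((List.pairwise_cons.mp h1).1 c h)
        refine hg2 c hc ?_
        intro hm
        rcases List.mem_cons.mp hm with rfl | hm
        · exact lt_irrefl c hcb
        · exact hn hm
      have ih' := ih hg2' (fun c hc hn => hg1 c (List.mem_cons_of_mem _ hc) hn)
        h1 (List.pairwise_cons.mp h2).2
      simp only [List.map_cons] at ih'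
      rw [he, ih']
      cases pvGg b (g1 b) (g2 b) <;> simp
  | case6 a t1 b t2 hab hba ih =>
      intro hg2 hg1 h1 h2
      have heq : a = b := le_antisymm (not_lt.mp hba) (not_lt.mp hab)
      subst heq
      simp only [List.map_cons]
      rw [pvMergeLoop]
      simp only [if_neg hab]
      rw [List.filterMap_cons]
      rw [pvEntry_eq_toList a (g1 a) (g2 a)]
      have hg2' : ∀ c ∈ t1, c ∉ t2 → g2 c = 0 := by
        intro c hc hn
        have hca : a < c := (List.pairwise_cons.mp h1).1 c hc
        refine hg2 c (List.mem_cons_of_mem _ hc) ?_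
        intro hm
        rcases List.mem_cons.mp hm with rfl | hm
        · exact lt_irrefl c hca
        · exact hn hm
      have hg1' : ∀ c ∈ t2, c ∉ t1 → g1 c = 0 := by
        intro c hc hn
        have hca : a < c := (List.pairwise_cons.mp h2).1 c hc
        refine hg1 c (List.mem_cons_of_mem _ hc) ?_
        intro hm
        rcases List.mem_cons.mp hm with rfl | hm
        · exact lt_irrefl c hca
        · exact hn hm
      have ih' := ih hg2' hg1' (List.pairwise_cons.mp h1).2 (List.pairwise_cons.mp h2).2
      rw [ih']
      cases pvGg a (g1 a) (g2 a) <;> simp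

-- pvRuns of a ≤-sorted list is the map of its strictly-sorted distinct letters to their counts
theorem pvRuns_spec : ∀ l : List Char, l.Pairwise (· ≤ ·) →
    ∃ ks : List Char, ks.Pairwise (· < ·) ∧ (∀ c, c ∈ ks ↔ c ∈ l) ∧
      pvRuns l = ks.map (fun c => (c, (l.count c : Int))) := by
  intro l
  fun_induction pvRuns l with
  | case1 => intro _; exact ⟨[], by simp, by simp, by simp⟩
  | case2 c rest ih =>
      intro hsort
      have hc_le : ∀ y ∈ rest, c ≤ y := (List.pairwise_cons.mp hsort).1
      have hrest : rest.Pairwise (· ≤ ·) := (List.pairwise_cons.mp hsort).2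
      have hd_sub : (rest.dropWhile (fun x => x == c)).Sublist rest := List.dropWhile_sublist _
      have hd_sorted : (rest.dropWhile (fun x => x == c)).Pairwise (· ≤ ·) :=
        hrest.sublist hd_sub
      have ht_mem : ∀ x ∈ rest.takeWhile (fun x => x == c), x = c := by
        intro x hx
        exact eq_of_beq (List.mem_takeWhile_imp (p := fun x => x == c) (l := rest) hx)
      have hd_gt : ∀ y ∈ rest.dropWhile (fun x => x == c), c < y := by
        cases hdn : rest.dropWhile (fun x => x == c) with
        | nil => intro y hy; simp at hy
        | cons h0 dtl =>
          intro y hy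
          have hh0mem : h0 ∈ rest := (hdn ▸ hd_sub).mem (by simp)
          have hne : rest.dropWhile (fun x => x == c) ≠ [] := by rw [hdn]; simp
          have hp0 : ¬ ((h0 == c) = true) := by
            have h := List.head_dropWhile_not (fun x => x == c) (l := rest) hne
            have hh : (rest.dropWhile (fun x => x == c)).head hne = h0 := by
              simp [hdn]
            rw [hh] at h
            simp only [h]
            exact Bool.false_ne_true
          have hch0 : c < h0 :=
            lt_of_le_of_ne (hc_le h0 hh0mem) (fun h => hp0 (by simp [h.symm]))
          rcases List.mem_cons.mp hy with rfl | hy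
          · exact hch0
          · have : h0 ≤ y := by
              have := hdn ▸ hd_sorted
              exact (List.pairwise_cons.mp this).1 y hy
            exact lt_of_lt_of_le hch0 this
      have hsplit : rest = rest.takeWhile (fun x => x == c) ++ rest.dropWhile (fun x => x == c) :=
        (List.takeWhile_append_dropWhile).symm
      obtain ⟨ks, hks_sorted, hks_mem, hks_eq⟩ := ih hd_sorted
      have hcd0 : (rest.dropWhile (fun x => x == c)).count c = 0 :=
        List.count_eq_zero.mpr (fun h => lt_irrefl c (hd_gt c h))
      have hct : (rest.takeWhile (fun x => x == c)).count c
          = (rest.takeWhile (fun x => x == c)).length :=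
        List.count_eq_length.mpr (fun b hb => (ht_mem b hb).symm)
      have hcl : (c :: rest).count c = (rest.takeWhile (fun x => x == c)).length + 1 := by
        rw [List.count_cons_self]
        conv_lhs => rw [hsplit]
        rw [List.count_append, hct, hcd0]
      have hck : ∀ k ∈ ks, (c :: rest).count k = (rest.dropWhile (fun x => x == c)).count k := by
        intro k hk
        have hkd : k ∈ rest.dropWhile (fun x => x == c) := (hks_mem k).mp hk
        have hkc : c < k := hd_gt k hkd
        have hkt : (rest.takeWhile (fun x => x == c)).count k = 0 :=
          List.count_eq_zero.mpr (fun h => absurd (ht_mem k h) (ne_of_gt hkc))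
        rw [List.count_cons_of_ne (ne_of_gt hkc).symm]
        conv_lhs => rw [hsplit]
        rw [List.count_append, hkt, Nat.zero_add]
      refine ⟨c :: ks, ?_, ?_, ?_⟩
      · exact List.pairwise_cons.mpr ⟨fun k hk => hd_gt k ((hks_mem k).mp hk), hks_sorted⟩
      · intro c'
        constructor
        · intro h
          rcases List.mem_cons.mp h with rfl | h
          · simp
          · exact List.mem_cons_of_mem _ (hd_sub.mem ((hks_mem c').mp h))
        · intro h
          rcases List.mem_cons.mp h with rfl | h
          · simp
          · rw [hsplit] at h
            rcases List.mem_append.mp h with h | h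
            · simp [ht_mem c' h]
            · exact List.mem_cons_of_mem _ ((hks_mem c').mpr h)
      · show (c, ((rest.takeWhile (fun x => x == c)).length : Int) + 1) ::
            pvRuns (rest.dropWhile (fun x => x == c))
            = (c :: ks).map (fun x => (x, ((c :: rest).count x : Int)))
        rw [List.map_cons, hks_eq]
        congr 1
        · rw [hcl]; push_cast; ring_nf
        · exact List.map_congr_left (fun k hk => by rw [hck k hk])

theorem pvPerm (s1 s2 : String) : (pvResA s1 s2).Perm (pvResB s1 s2) := by
  obtain ⟨ks1, hs1, hm1, he1⟩ := pvRuns_spec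
    (PySem.List.sorted (s1.toList.filter PySem.Str.islower) (fun c => c) false)
    (PySem.List.sorted_pairwise _ _)
  obtain ⟨ks2, hs2, hm2, he2⟩ := pvRuns_spec
    (PySem.List.sorted (s2.toList.filter PySem.Str.islower) (fun c => c) false)
    (PySem.List.sorted_pairwise _ _)
  have hperm1 := PySem.List.sorted_perm (s1.toList.filter PySem.Str.islower) (fun c => c) false
  have hperm2 := PySem.List.sorted_perm (s2.toList.filter PySem.Str.islower) (fun c => c) false
  have hcnt1 : ∀ c : Char,
      (((PySem.List.sorted (s1.toList.filter PySem.Str.islower) (fun c => c) false).count c : Nat) : Int)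
        = pvCnt s1.toList c := by
    intro c; unfold pvCnt; rw [hperm1.count_eq]
  have hcnt2 : ∀ c : Char,
      (((PySem.List.sorted (s2.toList.filter PySem.Str.islower) (fun c => c) false).count c : Nat) : Int)
        = pvCnt s2.toList c := by
    intro c; unfold pvCnt; rw [hperm2.count_eq]
  have hmem1 : ∀ c, c ∈ ks1 ↔ c ∈ s1.toList.filter PySem.Str.islower := by
    intro c; rw [hm1 c, PySem.List.mem_sorted]
  have hmem2 : ∀ c, c ∈ ks2 ↔ c ∈ s2.toList.filter PySem.Str.islower := by
    intro c; rw [hm2 c, PySem.List.mem_sorted]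
  have hB : pvResB s1 s2 = (pvUnion ks1 ks2).filterMap (pvG s1.toList s2.toList) := by
    unfold pvResB
    rw [he1, he2]
    rw [pvMerge_spec _ _ ks1 ks2
      (by intro c _ hn
          have : c ∉ s2.toList.filter PySem.Str.islower := fun h => hn ((hmem2 c).mpr h)
          simp [List.count_eq_zero.mpr ((PySem.List.mem_sorted _ _ _ _).not.mpr this)])
      (by intro c _ hn
          have : c ∉ s1.toList.filter PySem.Str.islower := fun h => hn ((hmem1 c).mpr h)
          simp [List.count_eq_zero.mpr ((PySem.List.mem_sorted _ _ _ _).not.mpr this)])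
      hs1 hs2]
    apply List.filterMap_congr
    intro c _
    rw [pvG_eq_pvGg, ← hcnt1 c, ← hcnt2 c]
  rw [pvResA_eq, hB]
  apply List.Perm.filterMap
  have h1 := PySem.Set.nodup_ofList (s1.toList.filter PySem.Str.islower)
  have h2 := PySem.Set.nodup_ofList (s2.toList.filter PySem.Str.islower)
  have hnd : (PySem.Set.inter (PySem.Set.ofList (s1.toList.filter PySem.Str.islower))
      (PySem.Set.ofList (s2.toList.filter PySem.Str.islower)) ++
      PySem.Set.diff (PySem.Set.ofList (s1.toList.filter PySem.Str.islower))
        (PySem.Set.ofList (s2.toList.filter PySem.Str.islower)) ++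
      PySem.Set.diff (PySem.Set.ofList (s2.toList.filter PySem.Str.islower))
        (PySem.Set.ofList (s1.toList.filter PySem.Str.islower))).Nodup := by
    rw [List.nodup_append, List.nodup_append]
    refine ⟨⟨PySem.Set.nodup_inter _ _ h1, PySem.Set.nodup_diff _ _ h1, ?_⟩,
      PySem.Set.nodup_diff _ _ h2, ?_⟩
    · intro a ha b hb
      have hA := (PySem.Set.mem_inter _ _ a).mp ha
      have hB := (PySem.Set.mem_diff _ _ b).mp hb
      rintro rfl; exact hB.2 hA.2
    · intro a ha b hb
      have hB := (PySem.Set.mem_diff _ _ b).mp hb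
      rintro rfl
      rcases (List.mem_append.mp ha) with h | h
      · exact hB.2 ((PySem.Set.mem_inter _ _ a).mp h).1
      · exact hB.2 ((PySem.Set.mem_diff _ _ a).mp h).1
  have hndu : (pvUnion ks1 ks2).Nodup :=
    (pvUnion_sorted ks1 ks2 hs1 hs2).imp (fun h => ne_of_lt h)
  refine (List.perm_ext_iff_of_nodup hnd hndu).mpr ?_
  intro a
  rw [pvMem_union a ks1 ks2, hmem1 a, hmem2 a]
  simp only [List.mem_append, PySem.Set.mem_inter, PySem.Set.mem_diff, PySem.Set.mem_ofList,
    List.mem_filter]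
  tauto

-- ===== VERDICT (by name: the statement is the Claim_ definition above) =====
theorem mix1_spec : Claim_equal_mix1 := by
  intro s1 s2 _
  unfold Spec_mix1
  rw [pvMix1_eq, pvMix1_alt_eq]
  have h := PySem.List.sorted_eq_sorted_of_perm (pvResA s1 s2) (pvResB s1 s2)
    (fun k : List Char => k) (fun a b hab => hab) (pvPerm s1 s2)
  rw [h]
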